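-- pv_equiv track=rewrite | github.com/chingsley/6314_ml_project_sample_collection | EnergySmells_Verified/ExtraUsageOfArrays/augmented/count_consecutive_ones/smelly_count_consecutive_ones.py | count_consecutive_ones
-- ===== SOURCE A (Python) =====
-- def count_consecutive_ones(input_str):
--     """Counts consecutive '1's in a string by repeatedly deleting elements from a list."""
--     arr = list(input_str)
--     count = 0
--     i = 0
--     while i < len(arr) - 1:
--         if arr[i] == "1" and arr[i + 1] == "1":
--             count += 1
--             del arr[i]
--         else:
--             i += 1
--     return count
-- ===== SOURCE B (Python) =====
-- def count_consecutive_ones(input_str):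
--     """Run-length scan: each maximal run of L consecutive '1's contributes L - 1."""
--     total = 0
--     run = 0
--     for ch in input_str:
--         if ch == '1':
--             run += 1
--         else:
--             if run:
--                 total += run - 1
--             run = 0
--     if run:
--         total += run - 1
--     return total
-- ===== Notes on version B (the rewrite author's own statement) =====
-- stated objective: faster
-- what changed: Replaces the deletion loop (each adjacent matching pair triggers an O(n) del from the list) by a single run-length scan that adds length-1 per maximal run of the counted character.
import Mathlib
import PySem

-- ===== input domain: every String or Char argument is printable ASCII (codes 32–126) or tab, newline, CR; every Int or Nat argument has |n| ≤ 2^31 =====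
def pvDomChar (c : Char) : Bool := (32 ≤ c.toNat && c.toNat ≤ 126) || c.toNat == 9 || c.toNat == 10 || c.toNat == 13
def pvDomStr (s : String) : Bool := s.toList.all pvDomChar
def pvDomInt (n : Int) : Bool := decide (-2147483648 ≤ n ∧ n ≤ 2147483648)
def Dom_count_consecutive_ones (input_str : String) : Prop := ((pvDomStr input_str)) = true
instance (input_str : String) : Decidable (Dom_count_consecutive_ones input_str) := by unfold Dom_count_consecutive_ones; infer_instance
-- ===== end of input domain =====

-- B replaces A's quadratic delete-on-match loop by one linear run-length scan (each maximal run of L '1's adds L-1).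

-- ===== PORT A =====
-- A's while-loop: state (arr, count, i); on a '1','1' pair delete arr[i], else i += 1.
def loopA_count (arr : List Char) (count : Int) (i : Nat) : Int :=
  if h : i + 1 < arr.length then
    if arr[i]'(by omega) = '1' ∧ arr[i + 1]'h = '1' then
      loopA_count (arr.eraseIdx i) (count + 1) i
    else
      loopA_count arr count (i + 1)
  else count
termination_by arr.length - i
decreasing_by
  · have hi' : i < arr.length := by omega
    simp only [List.length_eraseIdx, if_pos hi']
    omega
  · omega

def count_consecutive_ones (input_str : String) : Int :=
  loopA_count input_str.toList 0 0

-- ===== PORT B =====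
-- one step of B's for-loop: state (total, run)
def altStep (st : Int × Int) (ch : Char) : Int × Int :=
  if ch = '1' then (st.1, st.2 + 1)
  else if st.2 ≠ 0 then (st.1 + (st.2 - 1), 0) else (st.1, 0)

def count_consecutive_ones_alt (input_str : String) : Int :=
  let st := input_str.toList.foldl altStep (0, 0)
  if st.2 ≠ 0 then st.1 + (st.2 - 1) else st.1

-- ===== PRECONDITION & SPEC =====
def Spec_count_consecutive_ones (input_str : String) (out : Int) : Prop := out = count_consecutive_ones_alt input_str
instance (input_str : String) (out : Int) : Decidable (Spec_count_consecutive_ones input_str out) := by unfold Spec_count_consecutive_ones; infer_instance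

-- ===== CLAIM (what is proved, stated in full; the proofs are below) =====
def Claim_equal_count_consecutive_ones : Prop := ∀ (input_str : String), Dom_count_consecutive_ones input_str → Spec_count_consecutive_ones input_str (count_consecutive_ones input_str)

-- ===== LEMMAS AND PROOFS =====

-- number of adjacent ('1','1') pairs: the common characterisation of both programs
def pairs : List Char → Int
  | a :: b :: t => (if a = '1' ∧ b = '1' then 1 else 0) + pairs (b :: t)
  | _ => 0

theorem pairs_cons_ne (c : Char) (t : List Char) (hc : c ≠ '1') :
    pairs (c :: t) = pairs t := by
  cases t with
  | nil => rfl
  | cons b t' => simp [pairs, hc]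

theorem pairs_replicate (n : Nat) :
    pairs (List.replicate n '1') = if n = 0 then 0 else (n : Int) - 1 := by
  induction n with
  | zero => rfl
  | succ m ih =>
    cases m with
    | zero => rfl
    | succ k =>
      have : List.replicate (k + 1 + 1) '1' = '1' :: '1' :: List.replicate k '1' := by
        simp [List.replicate]
      rw [this]
      have h2 : ('1' : Char) :: List.replicate k '1' = List.replicate (k + 1) '1' := by
        simp [List.replicate]
      simp only [pairs, h2, ih]
      simp
      ring

theorem pairs_replicate_append (n : Nat) (c : Char) (t : List Char) (hc : c ≠ '1') :
    pairs (List.replicate n '1' ++ c :: t)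
      = (if n = 0 then 0 else (n : Int) - 1) + pairs (c :: t) := by
  induction n with
  | zero => simp
  | succ m ih =>
    cases m with
    | zero =>
      simp [pairs, hc]
    | succ k =>
      have : List.replicate (k + 1 + 1) '1' ++ c :: t
          = '1' :: (List.replicate (k + 1) '1' ++ c :: t) := by
        simp [List.replicate]
      rw [this]
      have hhd : List.replicate (k + 1) '1' ++ c :: t = '1' :: (List.replicate k '1' ++ c :: t) := by
        simp [List.replicate]
      rw [hhd]
      simp only [pairs]
      rw [← hhd, ih]
      simp
      ring

-- A's loop computes count + pairs of the unscanned suffix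
theorem loopA_eq (arr : List Char) (count : Int) (i : Nat) :
    loopA_count arr count i = count + pairs (arr.drop i) := by
  by_cases h : i + 1 < arr.length
  · have hi : i < arr.length := by omega
    have hdrop : arr.drop i = arr[i] :: arr.drop (i + 1) :=
      List.drop_eq_getElem_cons hi
    have hdrop2 : arr.drop (i + 1) = arr[i + 1] :: arr.drop (i + 2) :=
      List.drop_eq_getElem_cons h
    by_cases hones : arr[i] = '1' ∧ arr[i + 1] = '1'
    · have herase : (arr.eraseIdx i).drop i = arr.drop (i + 1) := by
        rw [List.eraseIdx_eq_take_drop_succ]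
        have hl : (arr.take i).length = i := by simp; omega
        have hd := List.drop_left (l₁ := arr.take i) (l₂ := arr.drop (i + 1))
        rw [hl] at hd
        exact hd
      have := loopA_eq (arr.eraseIdx i) (count + 1) i
      rw [loopA_count, dif_pos h, if_pos hones]
      rw [this, herase, hdrop, hdrop2]
      simp only [pairs]
      rw [if_pos hones]
      ring
    · have := loopA_eq arr count (i + 1)
      rw [loopA_count]
      simp only [h, dif_pos, hones, if_neg, not_false_iff]
      rw [this, hdrop]
      cases hd2 : arr.drop (i + 1) with
      | nil => simp [pairs]
      | cons b t =>
        have hb : b = arr[i + 1] := by rw [hdrop2] at hd2; exact (List.cons.injEq _ _ _ _ ▸ hd2).1.symm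
        simp only [pairs]
        have : ¬ (arr[i] = '1' ∧ b = '1') := by rw [hb]; exact hones
        simp [this]
  · rw [loopA_count]
    simp only [h, dif_neg, not_false_iff]
    have hlen : (arr.drop i).length ≤ 1 := by simp; omega
    cases hd : arr.drop i with
    | nil => simp [pairs]
    | cons a t =>
      cases t with
      | nil => simp [pairs]
      | cons b t' => rw [hd] at hlen; simp at hlen
termination_by arr.length - i
decreasing_by
  · have hi' : i < arr.length := by omega
    simp only [List.length_eraseIdx, if_pos hi']
    omega
  · omega

-- B's fold invariant: pending run of n ones + remaining list l
theorem altFold_eq (l : List Char) : ∀ (total : Int) (n : Nat),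
    (let st := l.foldl altStep (total, (n : Int));
     if st.2 ≠ 0 then st.1 + (st.2 - 1) else st.1)
      = total + pairs (List.replicate n '1' ++ l) := by
  induction l with
  | nil =>
    intro total n
    simp only [List.foldl_nil, List.append_nil]
    rw [pairs_replicate]
    cases n with
    | zero => simp
    | succ k =>
      rw [if_pos (by exact_mod_cast Nat.succ_ne_zero k), if_neg (Nat.succ_ne_zero k)]
  | cons c t ih =>
    intro total n
    by_cases hc : c = '1'
    · subst hc
      have hrep : List.replicate n '1' ++ '1' :: t = List.replicate (n + 1) '1' ++ t := by
        rw [List.replicate_succ' (n := n)]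
        simp
      have hstep : altStep (total, (n : Int)) '1' = (total, ((n + 1 : Nat) : Int)) := by
        simp [altStep]
      rw [List.foldl_cons, hstep, ih total (n + 1), hrep]
    · have hstep : altStep (total, (n : Int)) c
          = if (n : Int) ≠ 0 then (total + ((n : Int) - 1), 0) else (total, 0) := by
        simp [altStep, hc]
      rw [List.foldl_cons, hstep]
      rw [pairs_replicate_append n c t hc, pairs_cons_ne c t hc]
      by_cases hn : (n : Int) ≠ 0
      · have hn0 : ¬ (n = 0) := by omega
        rw [if_pos hn]
        have := ih (total + ((n : Int) - 1)) 0
        simp only [List.replicate_zero, List.nil_append] at this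
        rw [show ((0:Nat):Int) = 0 by rfl] at this
        rw [this]
        simp [hn0]
        ring
      · have hn0 : n = 0 := by omega
        subst hn0
        rw [if_neg hn]
        have := ih total 0
        simp only [List.replicate_zero, List.nil_append] at this
        rw [show ((0:Nat):Int) = 0 by rfl] at this
        rw [this]
        simp

theorem ports_agree (s : String) :
    count_consecutive_ones s = count_consecutive_ones_alt s := by
  rw [count_consecutive_ones, loopA_eq]
  rw [count_consecutive_ones_alt]
  have := altFold_eq s.toList 0 0
  simp only [List.replicate_zero, List.nil_append] at this
  rw [show ((0:Nat):Int) = 0 by rfl] at this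
  rw [this]
  simp

-- ===== VERDICT (by name: the statement is the Claim_ definition above) =====
theorem count_consecutive_ones_spec : Claim_equal_count_consecutive_ones := by
  intro s _
  unfold Spec_count_consecutive_ones
  exact ports_agree s
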